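-- pv_equiv track=rewrite | github.com/jeremywaller/advent-of-code | 2024/08/solution.py | place_resonance
-- ===== SOURCE A (Python) =====
-- def place_resonance(locations, antinode, distance, max_range, visited=None):
--     if visited is None:
--         visited = set()
--
--     if antinode in visited:
--         return locations
--     visited.add(antinode)
--
--     # positive direction
--     resonance = antinode[0] + distance[0], antinode[1] + distance[1]
--     if 0 <= resonance[0] < max_range[0] and 0 <= resonance[1] < max_range[1] and resonance not in visited:
--         locations.add(resonance)
--         locations = place_resonance(locations, resonance, distance, max_range, visited)
--
--     # negative direction
--     resonance = antinode[0] - distance[0], antinode[1] - distance[1]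
--     if 0 <= resonance[0] < max_range[0] and 0 <= resonance[1] < max_range[1] and resonance not in visited:
--         locations.add(resonance)
--         locations = place_resonance(locations, resonance, distance, max_range, visited)
--
--     return locations
-- ===== SOURCE B (Python) =====
-- def place_resonance(locations, antinode, distance, max_range, visited=None):
--     if visited is None:
--         visited = set()
--     if antinode in visited:
--         return locations
--     visited.add(antinode)
--     for step in (distance, (-distance[0], -distance[1])):
--         pos = (antinode[0] + step[0], antinode[1] + step[1])
--         while 0 <= pos[0] < max_range[0] and 0 <= pos[1] < max_range[1] and pos not in visited:
--             visited.add(pos)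
--             locations.add(pos)
--             pos = (pos[0] + step[0], pos[1] + step[1])
--     return locations
-- ===== Notes on version B (the rewrite author's own statement) =====
-- stated objective: simpler
-- what changed: A's shared-visited recursion (one call per point, each probing both directions) is replaced by two flat iterative while-loop walks from the antinode, one per direction, over the same visited/locations sets.
import Mathlib
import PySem

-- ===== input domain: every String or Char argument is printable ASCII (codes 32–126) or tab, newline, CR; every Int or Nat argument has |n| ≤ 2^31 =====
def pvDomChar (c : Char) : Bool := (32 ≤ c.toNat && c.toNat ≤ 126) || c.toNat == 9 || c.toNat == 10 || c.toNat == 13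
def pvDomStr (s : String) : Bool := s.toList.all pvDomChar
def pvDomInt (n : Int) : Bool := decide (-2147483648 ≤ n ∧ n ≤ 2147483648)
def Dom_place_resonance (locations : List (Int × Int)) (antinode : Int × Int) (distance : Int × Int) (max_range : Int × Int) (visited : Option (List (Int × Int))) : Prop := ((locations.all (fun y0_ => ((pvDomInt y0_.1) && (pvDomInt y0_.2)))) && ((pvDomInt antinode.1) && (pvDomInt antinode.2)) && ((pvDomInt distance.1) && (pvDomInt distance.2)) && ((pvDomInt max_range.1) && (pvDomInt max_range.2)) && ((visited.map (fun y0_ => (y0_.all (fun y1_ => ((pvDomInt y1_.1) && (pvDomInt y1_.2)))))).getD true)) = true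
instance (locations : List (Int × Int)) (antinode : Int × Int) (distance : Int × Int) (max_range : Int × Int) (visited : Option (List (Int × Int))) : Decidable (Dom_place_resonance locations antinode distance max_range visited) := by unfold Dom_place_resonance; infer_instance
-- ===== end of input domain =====

-- B replaces A's shared-visited recursion by two plain iterative line walks (same return value; both
-- A and B also mutate the caller's locations/visited sets identically — the equivalence proved here
-- is about the return value). Both ports thread the mutated visited set explicitly and use a fuel
-- counter solely as a totality guard (fuel max_range.1.toNat * max_range.2.toNat + 2 never runs out:
-- each recursive step adds a fresh in-range point to visited, proved below).

-- the in-range guard `0 <= p[0] < max_range[0] and 0 <= p[1] < max_range[1]`, shared by both ports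
def pvInR (mr p : Int × Int) : Bool :=
  decide (0 ≤ p.1) && decide (p.1 < mr.1) && decide (0 ≤ p.2) && decide (p.2 < mr.2)

-- ===== PORT A =====
def pvGoA (fuel : Nat) (locations : List (Int × Int)) (antinode d mr : Int × Int)
    (visited : List (Int × Int)) : List (Int × Int) × List (Int × Int) :=
  match fuel with
  | 0 => (locations, visited)  -- fuel guard only; never reached at the fuel place_resonance passes
  | fuel + 1 =>
    if PySem.Set.contains visited antinode then (locations, visited)
    else
      let visited := PySem.Set.add visited antinode
      -- positive direction
      let r1 : Int × Int := (antinode.1 + d.1, antinode.2 + d.2)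
      let (locations, visited) :=
        if pvInR mr r1 && !(PySem.Set.contains visited r1) then
          pvGoA fuel (PySem.Set.add locations r1) r1 d mr visited
        else (locations, visited)
      -- negative direction
      let r2 : Int × Int := (antinode.1 - d.1, antinode.2 - d.2)
      if pvInR mr r2 && !(PySem.Set.contains visited r2) then
        pvGoA fuel (PySem.Set.add locations r2) r2 d mr visited
      else (locations, visited)

def place_resonance (locations : List (Int × Int)) (antinode : Int × Int) (distance : Int × Int) (max_range : Int × Int) (visited : Option (List (Int × Int))) : List (Int × Int) :=
  (pvGoA (max_range.1.toNat * max_range.2.toNat + 2) locations antinode distance max_range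
    (visited.getD PySem.Set.empty)).1

-- ===== PORT B =====
-- one `while` loop: walk from pos by step while in range and unvisited
def pvWalk (fuel : Nat) (locations : List (Int × Int)) (pos step mr : Int × Int)
    (visited : List (Int × Int)) : List (Int × Int) × List (Int × Int) :=
  match fuel with
  | 0 => (locations, visited)  -- fuel guard only; never reached at the fuel place_resonance_alt passes
  | fuel + 1 =>
    if pvInR mr pos && !(PySem.Set.contains visited pos) then
      pvWalk fuel (PySem.Set.add locations pos) (pos.1 + step.1, pos.2 + step.2) step mr
        (PySem.Set.add visited pos)
    else (locations, visited)

def place_resonance_alt (locations : List (Int × Int)) (antinode : Int × Int) (distance : Int × Int) (max_range : Int × Int) (visited : Option (List (Int × Int))) : List (Int × Int) :=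
  let vis := visited.getD PySem.Set.empty
  if PySem.Set.contains vis antinode then locations
  else
    let vis := PySem.Set.add vis antinode
    let fuel := max_range.1.toNat * max_range.2.toNat + 2
    let (loc1, vis1) := pvWalk fuel locations
      (antinode.1 + distance.1, antinode.2 + distance.2) distance max_range vis
    let (loc2, _) := pvWalk fuel loc1
      (antinode.1 - distance.1, antinode.2 - distance.2) (-distance.1, -distance.2) max_range vis1
    loc2

-- ===== PRECONDITION & SPEC =====
def Spec_place_resonance (locations : List (Int × Int)) (antinode : Int × Int) (distance : Int × Int) (max_range : Int × Int) (visited : Option (List (Int × Int))) (out : List (Int × Int)) : Prop := out = place_resonance_alt locations antinode distance max_range visited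
instance (locations : List (Int × Int)) (antinode : Int × Int) (distance : Int × Int) (max_range : Int × Int) (visited : Option (List (Int × Int))) (out : List (Int × Int)) : Decidable (Spec_place_resonance locations antinode distance max_range visited out) := by unfold Spec_place_resonance; infer_instance

-- ===== CLAIM (what is proved, stated in full; the proofs are below) =====
def Claim_equal_place_resonance : Prop := ∀ (locations : List (Int × Int)) (antinode : Int × Int) (distance : Int × Int) (max_range : Int × Int) (visited : Option (List (Int × Int))), Dom_place_resonance locations antinode distance max_range visited → Spec_place_resonance locations antinode distance max_range visited (place_resonance locations antinode distance max_range visited)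

-- ===== LEMMAS AND PROOFS =====

-- number of distinct visited points that lie in range (the fuel-sufficiency measure)
def pvCnt (mr : Int × Int) (vis : List (Int × Int)) : Nat :=
  ((PySem.Set.ofList vis).filter (fun p => pvInR mr p)).length

-- a duplicate-free list of in-range points has at most max_range.1 * max_range.2 elements
lemma pvCard (mr : Int × Int) (v : List (Int × Int)) (hnd : v.Nodup)
    (hall : ∀ p ∈ v, pvInR mr p = true) : v.length ≤ mr.1.toNat * mr.2.toNat := by
  have hran : ∀ p ∈ v, 0 ≤ p.1 ∧ p.1 < mr.1 ∧ 0 ≤ p.2 ∧ p.2 < mr.2 := by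
    intro p hp
    have := hall p hp
    simp [pvInR] at this
    tauto
  set M := mr.2.toNat with hM
  set f : Int × Int → Nat := fun p => p.2.toNat + p.1.toNat * M with hf
  have hinj : ∀ p ∈ v, ∀ q ∈ v, f p = f q → p = q := by
    intro p hp q hq heq
    obtain ⟨hp1, hp2, hp3, hp4⟩ := hran p hp
    obtain ⟨hq1, hq2, hq3, hq4⟩ := hran q hq
    have hpM : p.2.toNat < M := by omega
    have hqM : q.2.toNat < M := by omega
    have h2 : p.2.toNat = q.2.toNat := by
      have h1 := congrArg (· % M) heq
      simpa [hf, Nat.add_mul_mod_self_right, Nat.mod_eq_of_lt hpM, Nat.mod_eq_of_lt hqM] using h1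
    have hMpos : 0 < M := by omega
    have h1 : p.1.toNat = q.1.toNat := by
      have heq' : p.2.toNat + p.1.toNat * M = q.2.toNat + q.1.toNat * M := heq
      have : p.1.toNat * M = q.1.toNat * M := by omega
      exact Nat.eq_of_mul_eq_mul_right hMpos this
    have : p.1 = q.1 ∧ p.2 = q.2 := by omega
    exact Prod.ext this.1 this.2
  have hlt : ∀ x ∈ v.map f, x < mr.1.toNat * M := by
    intro x hx
    obtain ⟨p, hp, rfl⟩ := List.mem_map.1 hx
    obtain ⟨hp1, hp2, hp3, hp4⟩ := hran p hp
    have h1 : p.2.toNat + p.1.toNat * M < (p.1.toNat + 1) * M := by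
      rw [Nat.succ_mul]; omega
    have h2 : (p.1.toNat + 1) * M ≤ mr.1.toNat * M := Nat.mul_le_mul_right M (by omega)
    exact lt_of_lt_of_le h1 h2
  have hm : (v.map f).Nodup := hnd.map_on hinj
  have hsub : (v.map f).toFinset ⊆ Finset.range (mr.1.toNat * M) := by
    intro x hx
    exact Finset.mem_range.2 (hlt x (List.mem_toFinset.1 hx))
  have := Finset.card_le_card hsub
  rw [List.toFinset_card_of_nodup hm, Finset.card_range, List.length_map] at this
  exact this

lemma pvCnt_le (mr : Int × Int) (vis : List (Int × Int)) :
    pvCnt mr vis ≤ mr.1.toNat * mr.2.toNat := by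
  apply pvCard
  · exact (PySem.Set.nodup_ofList vis).filter _
  · intro p hp
    exact List.of_mem_filter hp

lemma pvCnt_add (mr : Int × Int) (vis : List (Int × Int)) (p : Int × Int)
    (hp : p ∉ vis) (hr : pvInR mr p = true) :
    pvCnt mr (PySem.Set.add vis p) = pvCnt mr vis + 1 := by
  have h1 : PySem.Set.add vis p = vis ++ [p] := PySem.Set.add_of_not_mem hp
  have h2 : PySem.Set.ofList (vis ++ [p]) = PySem.Set.add (PySem.Set.ofList vis) p :=
    PySem.Set.ofList_append_singleton vis p
  have h3 : p ∉ PySem.Set.ofList vis := fun h => hp ((PySem.Set.mem_ofList vis p).1 h)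
  rw [pvCnt, h1, h2, PySem.Set.add_of_not_mem h3, List.filter_append]
  simp [pvCnt, hr]

-- the walk only ever adds to visited
lemma pvWalk_mem (q : Int × Int) : ∀ (fuel : Nat) (loc : List (Int × Int))
    (pos step mr : Int × Int) (vis : List (Int × Int)), q ∈ vis →
    q ∈ (pvWalk fuel loc pos step mr vis).2 := by
  intro fuel
  induction fuel with
  | zero => intro loc pos step mr vis hq; simpa [pvWalk] using hq
  | succ f ih =>
    intro loc pos step mr vis hq
    rw [pvWalk]
    split
    · exact ih _ _ _ _ _ ((PySem.Set.mem_add vis pos q).2 (Or.inl hq))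
    · exact hq

-- A's positive-direction branch is the forward walk: the backward probe of every chain node
-- hits that node's predecessor, which is already visited
lemma pvGoA_eq_walk_pos (d mr : Int × Int) : ∀ (fuel : Nat) (loc : List (Int × Int))
    (p : Int × Int) (vis : List (Int × Int)),
    (p.1 - d.1, p.2 - d.2) ∈ vis →
    mr.1.toNat * mr.2.toNat + 1 ≤ pvCnt mr vis + fuel →
    (if pvInR mr p && !(PySem.Set.contains vis p) then
        pvGoA fuel (PySem.Set.add loc p) p d mr vis
      else (loc, vis))
      = pvWalk (fuel + 1) loc p d mr vis := by
  intro fuel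
  induction fuel with
  | zero =>
    intro loc p vis hmem hfuel
    exact absurd hfuel (by have := pvCnt_le mr vis; omega)
  | succ f ih =>
    intro loc p vis hmem hfuel
    by_cases hg : (pvInR mr p && !(PySem.Set.contains vis p)) = true
    · obtain ⟨hinr, hnc⟩ := Bool.and_eq_true_iff.1 hg
      have hpvis : p ∉ vis := by
        intro h
        rw [(PySem.Set.contains_iff vis p).2 h] at hnc
        simp at hnc
      rw [if_pos hg, pvGoA]
      have hc : PySem.Set.contains vis p = false := by
        cases h : PySem.Set.contains vis p
        · rfl
        · rw [h] at hnc; simp at hnc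
      rw [hc]
      simp only [Bool.false_eq_true, if_false]
      have hpeq : ((p.1 + d.1) - d.1, (p.2 + d.2) - d.2) = p := by
        cases p; simp
      have hinner := ih (PySem.Set.add loc p) (p.1 + d.1, p.2 + d.2) (PySem.Set.add vis p)
        (by rw [hpeq] at *; exact (PySem.Set.mem_add vis p p).2 (Or.inr rfl))
        (by rw [pvCnt_add mr vis p hpvis hinr]; omega)
      simp only at hinner
      rw [hinner]
      have hmem2 : (p.1 - d.1, p.2 - d.2) ∈
          (pvWalk (f + 1) (PySem.Set.add loc p) (p.1 + d.1, p.2 + d.2) d mr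
            (PySem.Set.add vis p)).2 :=
        pvWalk_mem _ _ _ _ _ _ _ ((PySem.Set.mem_add vis p _).2 (Or.inl hmem))
      rcases hw : pvWalk (f + 1) (PySem.Set.add loc p) (p.1 + d.1, p.2 + d.2) d mr
          (PySem.Set.add vis p) with ⟨l1, v1⟩
      rw [hw] at hmem2
      simp only at hmem2
      have hc2 : PySem.Set.contains v1 (p.1 - d.1, p.2 - d.2) = true :=
        (PySem.Set.contains_iff v1 _).2 hmem2
      rw [hc2]
      conv_rhs => rw [pvWalk]
      rw [if_pos hg, hw]
      simp
    · rw [if_neg hg]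
      conv_rhs => rw [pvWalk]
      rw [if_neg hg]

-- mirror lemma: A's negative-direction branch is the backward walk
lemma pvGoA_eq_walk_neg (d mr : Int × Int) : ∀ (fuel : Nat) (loc : List (Int × Int))
    (p : Int × Int) (vis : List (Int × Int)),
    (p.1 + d.1, p.2 + d.2) ∈ vis →
    mr.1.toNat * mr.2.toNat + 1 ≤ pvCnt mr vis + fuel →
    (if pvInR mr p && !(PySem.Set.contains vis p) then
        pvGoA fuel (PySem.Set.add loc p) p d mr vis
      else (loc, vis))
      = pvWalk (fuel + 1) loc p (-d.1, -d.2) mr vis := by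
  intro fuel
  induction fuel with
  | zero =>
    intro loc p vis hmem hfuel
    exact absurd hfuel (by have := pvCnt_le mr vis; omega)
  | succ f ih =>
    intro loc p vis hmem hfuel
    by_cases hg : (pvInR mr p && !(PySem.Set.contains vis p)) = true
    · obtain ⟨hinr, hnc⟩ := Bool.and_eq_true_iff.1 hg
      have hpvis : p ∉ vis := by
        intro h
        rw [(PySem.Set.contains_iff vis p).2 h] at hnc
        simp at hnc
      rw [if_pos hg, pvGoA]
      have hc : PySem.Set.contains vis p = false := by
        cases h : PySem.Set.contains vis p
        · rfl
        · rw [h] at hnc; simp at hnc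
      rw [hc]
      simp only [Bool.false_eq_true, if_false]
      -- the positive probe hits the already-visited predecessor
      have hc1 : PySem.Set.contains (PySem.Set.add vis p) (p.1 + d.1, p.2 + d.2) = true :=
        (PySem.Set.contains_iff _ _).2 ((PySem.Set.mem_add vis p _).2 (Or.inl hmem))
      rw [hc1]
      simp only [Bool.not_true, Bool.and_false, Bool.false_eq_true, if_false]
      have hpeq : ((p.1 - d.1) + d.1, (p.2 - d.2) + d.2) = p := by
        cases p; simp
      have hinner := ih (PySem.Set.add loc p) (p.1 - d.1, p.2 - d.2) (PySem.Set.add vis p)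
        (by rw [hpeq] at *; exact (PySem.Set.mem_add vis p p).2 (Or.inr rfl))
        (by rw [pvCnt_add mr vis p hpvis hinr]; omega)
      simp only at hinner
      rw [hinner]
      conv_rhs => rw [pvWalk]
      rw [if_pos hg]
      have : (p.1 + -d.1, p.2 + -d.2) = (p.1 - d.1, p.2 - d.2) := by
        simp [sub_eq_add_neg]
      rw [this]
    · rw [if_neg hg]
      conv_rhs => rw [pvWalk]
      rw [if_neg hg]

theorem pv_top (locations : List (Int × Int)) (antinode : Int × Int) (distance : Int × Int)
    (max_range : Int × Int) (visited : Option (List (Int × Int))) :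
    place_resonance locations antinode distance max_range visited
      = place_resonance_alt locations antinode distance max_range visited := by
  rw [place_resonance, place_resonance_alt]
  set vis0 := visited.getD PySem.Set.empty with hvis0
  set N := max_range.1.toNat * max_range.2.toNat with hN
  cases hc : PySem.Set.contains vis0 antinode with
  | true =>
    rw [pvGoA, hc]
    simp
  | false =>
    rw [pvGoA, hc]
    simp only [Bool.false_eq_true, if_false]
    set vis1 := PySem.Set.add vis0 antinode with hvis1
    set r1 : Int × Int := (antinode.1 + distance.1, antinode.2 + distance.2) with hr1
    have hpeq1 : (r1.1 - distance.1, r1.2 - distance.2) = antinode := by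
      cases antinode; simp [hr1]
    have hfwd := pvGoA_eq_walk_pos distance max_range (N + 1) locations r1 vis1
      (by rw [hpeq1]; exact (PySem.Set.mem_add vis0 antinode antinode).2 (Or.inr rfl))
      (by omega)
    simp only at hfwd
    rw [hfwd]
    rcases hw1 : pvWalk (N + 1 + 1) locations r1 distance max_range vis1 with ⟨l1, v1⟩
    simp only
    set r2 : Int × Int := (antinode.1 - distance.1, antinode.2 - distance.2) with hr2
    have hpeq2 : (r2.1 + distance.1, r2.2 + distance.2) = antinode := by
      cases antinode; simp [hr2]
    have hmema : antinode ∈ v1 := by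
      have h1 : antinode ∈ vis1 := (PySem.Set.mem_add vis0 antinode antinode).2 (Or.inr rfl)
      have := pvWalk_mem antinode (N + 1 + 1) locations r1 distance max_range vis1 h1
      rw [hw1] at this
      exact this
    have hbwd := pvGoA_eq_walk_neg distance max_range (N + 1) l1 r2 v1
      (by rw [hpeq2]; exact hmema) (by omega)
    simp only at hbwd
    have hee : N + 1 + 1 = N + 2 := rfl
    rw [hee] at hbwd
    rw [hbwd]

-- ===== VERDICT (by name: the statement is the Claim_ definition above) =====
theorem place_resonance_spec : Claim_equal_place_resonance := by
  intro locations antinode distance max_range visited _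
  unfold Spec_place_resonance
  exact pv_top locations antinode distance max_range visited
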